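-- pv_equiv track=rewrite | github.com/viniciusborges17/LP2_2s2017 | lista2/test_ex08_first_half.py | first_half
-- ===== SOURCE A (Python) =====
-- def first_half(s):
--   s = list(s)
--   lista =[]
--   i = 0
--   while i < (len(s)/2):
--     lista.append(s[i])
--     i += 1
--   return ''.join(lista)
-- ===== SOURCE B (Python) =====
-- def first_half(s):
--   return s[:(len(s) + 1) // 2]
-- ===== Notes on version B (the rewrite author's own statement) =====
-- stated objective: idiomatic
-- what changed: Replaces the index-by-index while loop with list+join by a single slice s[:(len(s)+1)//2] (ceil, matching A's float-division loop bound).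
import Mathlib
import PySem

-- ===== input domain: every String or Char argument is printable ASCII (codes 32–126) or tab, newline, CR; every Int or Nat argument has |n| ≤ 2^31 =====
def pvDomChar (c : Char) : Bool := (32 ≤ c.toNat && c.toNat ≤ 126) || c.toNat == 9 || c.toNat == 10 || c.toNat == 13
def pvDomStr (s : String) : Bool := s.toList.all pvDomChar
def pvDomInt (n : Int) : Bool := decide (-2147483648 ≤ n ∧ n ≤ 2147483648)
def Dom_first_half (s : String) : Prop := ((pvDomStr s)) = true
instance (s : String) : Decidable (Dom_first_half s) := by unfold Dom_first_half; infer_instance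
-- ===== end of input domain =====

-- B replaces A's index-by-index while loop (append chars while i < len/2, then join) with one ceil slice s[:(len(s)+1)//2]; idiomatic, same O(n).


-- ===== PORT A =====
-- while i < (len(s)/2): lista.append(s[i]); i += 1.  Python's len(s)/2 is FLOAT division,
-- so 'i < len(s)/2' ⟺ '2*i < len(s)' exactly (both sides integers).  s[i] is always in
-- range here (2*i < len ⇒ i < len), so the none branch of pyGet? is unreachable.
def first_half_loop (cs : List Char) (i : Nat) (lista : List Char) : List Char :=
  if 2 * i < cs.length then
    match PySem.List.pyGet? cs (i : Int) with
    | some c => first_half_loop cs (i + 1) (lista ++ [c])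
    | none => lista
  else lista
termination_by cs.length - i
decreasing_by omega

-- ''.join(lista) on single characters = the string of the collected chars
def first_half (s : String) : String :=
  String.ofList (first_half_loop s.toList 0 [])

-- ===== PORT B =====
-- return s[:(len(s)+1)//2]
def first_half_alt (s : String) : String :=
  PySem.Str.slice s none (some (PySem.Int.floordiv ((PySem.Str.len s) + 1) 2))

-- ===== PRECONDITION & SPEC =====
def Spec_first_half (s : String) (out : String) : Prop := out = first_half_alt s
instance (s : String) (out : String) : Decidable (Spec_first_half s out) := by unfold Spec_first_half; infer_instance

-- ===== CLAIM (what is proved, stated in full; the proofs are below) =====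
def Claim_equal_first_half : Prop := ∀ (s : String), Dom_first_half s → Spec_first_half s (first_half s)

-- ===== LEMMAS AND PROOFS =====

-- loop invariant: from index i the loop appends exactly the chars i..⌈n/2⌉-1
theorem first_half_loop_eq (cs : List Char) (i : Nat) (lista : List Char) :
    first_half_loop cs i lista = lista ++ (cs.drop i).take ((cs.length + 1) / 2 - i) := by
  fun_induction first_half_loop cs i lista with
  | case1 i lista hlt c hget ih =>
      have hi : i < cs.length := by omega
      have hc : cs[i] = c := by
        have := hget
        simp [PySem.List.pyGet?, PySem.List.pyIdx?, hi] at this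
        simpa using this
      rw [ih]
      have hdrop : cs.drop i = cs[i] :: cs.drop (i + 1) :=
        List.drop_eq_getElem_cons hi
      rw [hdrop, hc]
      have hk : (cs.length + 1) / 2 - i = ((cs.length + 1) / 2 - (i + 1)) + 1 := by omega
      rw [hk, List.take_succ_cons]
      simp
  | case2 i lista hlt hget =>
      -- unreachable: pyGet? returns some when i < length
      have hi : i < cs.length := by omega
      simp [PySem.List.pyGet?, PySem.List.pyIdx?, hi] at hget
  | case3 i lista hlt =>
      have : (cs.length + 1) / 2 - i = 0 := by omega
      simp [this]

-- ===== VERDICT (by name: the statement is the Claim_ definition above) =====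
theorem first_half_spec : Claim_equal_first_half := by
  intro s _
  unfold Spec_first_half first_half first_half_alt
  rw [first_half_loop_eq]
  have hb : (0 : Int) < 2 := by omega
  rw [PySem.Int.floordiv_eq_ediv_of_pos hb]
  -- s[:b] with b = (len+1)/2 ≥ 0: slice = take b
  have hlen : PySem.Str.len s = (s.toList.length : Int) := PySem.Str.len_eq s
  rw [hlen]
  have : ((s.toList.length : Int) + 1) / 2 = (((s.toList.length + 1) / 2 : Nat) : Int) := by
    push_cast; omega
  rw [this]
  unfold PySem.Str.slice
  rw [PySem.Chars.slice_eq_listSlice, PySem.List.slice_to_natCast]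
  rfl
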